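-- pv_equiv track=rewrite | github.com/amol-ship-it/agi-core | domains/arc/primitives.py | complete_symmetry_diagonal
-- ===== SOURCE A (Python) =====
-- Grid = list[list[int]]
--
-- def complete_symmetry_diagonal(grid: Grid) -> Grid:
--     """Complete main diagonal symmetry."""
--     if not grid or not grid[0]:
--         return grid
--     h, w = len(grid), len(grid[0])
--     n = min(h, w)
--     result = [row[:] for row in grid]
--     for r in range(n):
--         for c in range(r + 1, n):
--             if grid[r][c] != 0 and grid[c][r] == 0:
--                 result[c][r] = grid[r][c]
--             elif grid[c][r] != 0 and grid[r][c] == 0: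
--                 result[r][c] = grid[c][r]
--     return result
-- ===== SOURCE B (Python) =====
-- Grid = list[list[int]]
--
-- def complete_symmetry_diagonal(grid: Grid) -> Grid:
--     """Complete main diagonal symmetry: overlay the grid with its transpose, 0 = empty."""
--     if not grid or not grid[0]:
--         return grid
--     n = min(len(grid), len(grid[0]))
--     return [
--         [(grid[r][c] if grid[r][c] != 0 else grid[c][r]) if r < n and c < n else grid[r][c]
--          for c in range(len(grid[r]))]
--         for r in range(len(grid))
--     ]
-- ===== Notes on version B (the rewrite author's own statement) =====
-- stated objective: simpler
-- what changed: B rebuilds the grid in one pure elementwise comprehension that overlays the grid with its transpose (cell = grid[r][c] if nonzero else grid[c][r] inside the n-by-n square), instead of A's copy-then-mutate loop over upper-triangle pairs that writes both mirror directions.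
import Mathlib
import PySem

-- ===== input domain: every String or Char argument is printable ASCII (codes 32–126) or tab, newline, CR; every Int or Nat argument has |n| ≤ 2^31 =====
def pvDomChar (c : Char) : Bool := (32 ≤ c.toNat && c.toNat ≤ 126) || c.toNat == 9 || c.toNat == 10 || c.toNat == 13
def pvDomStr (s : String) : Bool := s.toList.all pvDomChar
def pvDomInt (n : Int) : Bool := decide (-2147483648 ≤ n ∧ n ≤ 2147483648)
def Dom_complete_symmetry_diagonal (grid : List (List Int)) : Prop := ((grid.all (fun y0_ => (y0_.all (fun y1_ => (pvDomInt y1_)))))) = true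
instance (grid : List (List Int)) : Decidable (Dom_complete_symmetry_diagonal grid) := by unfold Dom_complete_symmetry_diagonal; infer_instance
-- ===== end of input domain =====

-- B replaces A's copy-then-mutate pair loop by one pure comprehension overlaying the grid with its
-- transpose (objective: simpler). A mutates only its private copy, so return-value equivalence is the whole story.

-- ===== PORT A =====
-- grid[i][j] on a (possibly ragged) grid; indices here are always the nonnegative ints produced by range()
def pvG (g : List (List Int)) (i j : Nat) : Int := (g.getD i []).getD j 0

-- result[i][j] = v
def pvSet2 (res : List (List Int)) (i j : Nat) (v : Int) : List (List Int) :=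
  res.set i ((res.getD i []).set j v)

-- the body of A's inner loop for the pair (r, c)
def pvStepA (g res : List (List Int)) (r c : Nat) : List (List Int) :=
  if pvG g r c ≠ 0 ∧ pvG g c r = 0 then pvSet2 res c r (pvG g r c)
  else if pvG g c r ≠ 0 ∧ pvG g r c = 0 then pvSet2 res r c (pvG g c r)
  else res

def complete_symmetry_diagonal (grid : List (List Int)) : List (List Int) :=
  if grid = [] ∨ grid.headD [] = [] then grid
  else
    let n := min grid.length (grid.headD []).length
    -- result = [row[:] for row in grid]; for r in range(n): for c in range(r+1, n): …
    (List.range n).foldl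
      (fun res r =>
        (List.range' (r + 1) (n - (r + 1))).foldl (fun res2 c => pvStepA grid res2 r c) res)
      (grid.map (fun row => row))

-- ===== PORT B =====
def complete_symmetry_diagonal_alt (grid : List (List Int)) : List (List Int) :=
  if grid = [] ∨ grid.headD [] = [] then grid
  else
    let n := min grid.length (grid.headD []).length
    (List.range grid.length).map (fun r =>
      (List.range (grid.getD r []).length).map (fun c =>
        if r < n ∧ c < n then (if pvG grid r c ≠ 0 then pvG grid r c else pvG grid c r)
        else pvG grid r c))

-- ===== PRECONDITION & SPEC =====
-- Pre_ excludes exactly the ragged grids on which A raises IndexError: A unconditionally reads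
-- grid[r][c] and grid[c][r] for every pair r < c < n, so it returns iff all those cells exist.
def Pre_complete_symmetry_diagonal (grid : List (List Int)) : Prop :=
  ∀ c < min grid.length (grid.headD []).length, ∀ r < c,
    c < (grid.getD r []).length ∧ r < (grid.getD c []).length

instance (grid : List (List Int)) : Decidable (Pre_complete_symmetry_diagonal grid) := by
  unfold Pre_complete_symmetry_diagonal; infer_instance

def pvWitness_complete_symmetry_diagonal : List (List Int) := [[1, 0], [0, 2]]

def Spec_complete_symmetry_diagonal (grid : List (List Int)) (out : List (List Int)) : Prop :=
  out = complete_symmetry_diagonal_alt grid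
instance (grid : List (List Int)) (out : List (List Int)) : Decidable (Spec_complete_symmetry_diagonal grid out) := by unfold Spec_complete_symmetry_diagonal; infer_instance

-- ===== CLAIM (what is proved, stated in full; the proofs are below) =====
def Claim_equal_complete_symmetry_diagonal : Prop := ∀ (grid : List (List Int)), Dom_complete_symmetry_diagonal grid → Pre_complete_symmetry_diagonal grid → Spec_complete_symmetry_diagonal grid (complete_symmetry_diagonal grid)

-- ===== LEMMAS AND PROOFS =====

-- which cell the pair (r, c) writes, and A always writes the transposed value there
abbrev pvWrites (g : List (List Int)) (r c i j : Nat) : Prop :=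
  (pvG g r c ≠ 0 ∧ pvG g c r = 0 ∧ i = c ∧ j = r) ∨
  (pvG g c r ≠ 0 ∧ pvG g r c = 0 ∧ i = r ∧ j = c)

theorem pvGetD_set (l : List Int) (b : Nat) (v : Int) (j : Nat) :
    ((l.set b v).getD j 0) = if j = b ∧ b < l.length then v else l.getD j 0 := by
  simp only [List.getD_eq_getElem?_getD, List.getElem?_set]
  by_cases hjb : b = j <;> by_cases hbl : b < l.length <;>
    split_ifs <;> first
      | rfl
      | simp_all

theorem pvG_set2 (res : List (List Int)) (a b : Nat) (v : Int) (i j : Nat) :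
    pvG (pvSet2 res a b v) i j =
      if i = a ∧ j = b ∧ a < res.length ∧ b < (res.getD a []).length then v
      else pvG res i j := by
  unfold pvG pvSet2
  by_cases hal : a < res.length
  · by_cases hia : i = a
    · subst hia
      rw [show (res.set i ((res.getD i []).set b v)).getD i [] = (res.getD i []).set b v by
          simp only [List.getD_eq_getElem?_getD, List.getElem?_set_self hal, Option.getD_some],
        pvGetD_set]
      by_cases h : j = b ∧ b < (res.getD i []).length
      · rw [if_pos h, if_pos ⟨rfl, h.1, hal, h.2⟩]
      · rw [if_neg h, if_neg (by tauto)]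
    · rw [show (res.set a ((res.getD a []).set b v)).getD i [] = res.getD i [] by
          simp only [List.getD_eq_getElem?_getD, List.getElem?_set_ne (fun h => hia h.symm)],
        if_neg (by tauto)]
  · rw [List.set_eq_of_length_le (by omega), if_neg (by tauto)]

theorem pvLen_set2 (res : List (List Int)) (a b : Nat) (v : Int) :
    (pvSet2 res a b v).length = res.length := by
  simp [pvSet2]

theorem pvRowLen_set2 (res : List (List Int)) (a b : Nat) (v : Int) (i : Nat) :
    ((pvSet2 res a b v).getD i []).length = (res.getD i []).length := by
  unfold pvSet2
  by_cases hal : a < res.length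
  · by_cases hia : i = a
    · subst hia
      rw [show (res.set i ((res.getD i []).set b v)).getD i [] = (res.getD i []).set b v by
          simp only [List.getD_eq_getElem?_getD, List.getElem?_set_self hal, Option.getD_some]]
      simp
    · rw [show (res.set a ((res.getD a []).set b v)).getD i [] = res.getD i [] by
          simp only [List.getD_eq_getElem?_getD, List.getElem?_set_ne (fun h => hia h.symm)]]
  · rw [List.set_eq_of_length_le (by omega)]

theorem pvLen_stepA (g res : List (List Int)) (r c : Nat) :
    (pvStepA g res r c).length = res.length := by
  unfold pvStepA; split_ifs <;> simp [pvLen_set2]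

theorem pvRowLen_stepA (g res : List (List Int)) (r c : Nat) (i : Nat) :
    ((pvStepA g res r c).getD i []).length = (res.getD i []).length := by
  unfold pvStepA; split_ifs <;> simp only [pvRowLen_set2]

theorem pvG_stepA (g res : List (List Int)) (r c i j : Nat)
    (hc : c < res.length) (hcr : r < (res.getD c []).length)
    (hr : r < res.length) (hrc : c < (res.getD r []).length) :
    pvG (pvStepA g res r c) i j =
      if pvWrites g r c i j then pvG g j i else pvG res i j := by
  unfold pvStepA
  by_cases hW : pvWrites g r c i j
  · rw [if_pos hW]
    unfold pvWrites at hW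
    rcases hW with ⟨ha, hb, rfl, rfl⟩ | ⟨ha, hb, rfl, rfl⟩
    · rw [if_pos ⟨ha, hb⟩, pvG_set2, if_pos ⟨rfl, rfl, hc, hcr⟩]
    · rw [if_neg (by tauto), if_pos ⟨ha, hb⟩, pvG_set2, if_pos ⟨rfl, rfl, hr, hrc⟩]
  · rw [if_neg hW]
    unfold pvWrites at hW
    split_ifs with h1 h2
    · rw [pvG_set2, if_neg (by tauto)]
    · rw [pvG_set2, if_neg (by tauto)]
    · rfl

theorem pvG_foldPairs (g : List (List Int)) (n : Nat)
    (hpre : ∀ c < n, ∀ r < c, c < (g.getD r []).length ∧ r < (g.getD c []).length)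
    (hn : n ≤ g.length)
    (P : List (Nat × Nat)) (hP : ∀ p ∈ P, p.1 < p.2 ∧ p.2 < n)
    (res : List (List Int)) (h1 : res.length = g.length)
    (h2 : ∀ i, (res.getD i []).length = (g.getD i []).length)
    (i j : Nat) :
    pvG (P.foldl (fun acc p => pvStepA g acc p.1 p.2) res) i j =
      if ∃ p ∈ P, pvWrites g p.1 p.2 i j then pvG g j i else pvG res i j := by
  induction P generalizing res with
  | nil => simp
  | cons p P ih =>
    have hp := hP p (List.mem_cons_self ..)
    have hpair := hpre p.2 hp.2 p.1 hp.1
    rw [List.foldl_cons,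
      ih (fun q hq => hP q (List.mem_cons_of_mem _ hq)) _
        (by rw [pvLen_stepA, h1]) (fun k => by rw [pvRowLen_stepA]; exact h2 k),
      pvG_stepA g res p.1 p.2 i j (by omega) (by rw [h2]; exact hpair.2)
        (by omega) (by rw [h2]; exact hpair.1)]
    have hcons : (∃ q ∈ p :: P, pvWrites g q.1 q.2 i j) ↔
        (pvWrites g p.1 p.2 i j ∨ ∃ q ∈ P, pvWrites g q.1 q.2 i j) := by
      constructor
      · rintro ⟨q, hq, hwq⟩
        rcases List.mem_cons.mp hq with rfl | hq'
        · exact Or.inl hwq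
        · exact Or.inr ⟨q, hq', hwq⟩
      · rintro (h | ⟨q, hq, hwq⟩)
        · exact ⟨p, List.mem_cons_self .., h⟩
        · exact ⟨q, List.mem_cons_of_mem _ hq, hwq⟩
    simp only [hcons]
    by_cases hz : ∃ q ∈ P, pvWrites g q.1 q.2 i j
    · rw [if_pos hz, if_pos (Or.inr hz)]
    · rw [if_neg hz]
      by_cases hw : pvWrites g p.1 p.2 i j
      · rw [if_pos hw, if_pos (Or.inl hw)]
      · rw [if_neg hw, if_neg (fun h => h.elim hw hz)]

theorem pvLen_foldPairs (g : List (List Int)) (P : List (Nat × Nat)) (res : List (List Int)) :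
    (P.foldl (fun acc p => pvStepA g acc p.1 p.2) res).length = res.length := by
  induction P generalizing res with
  | nil => rfl
  | cons p P ih => rw [List.foldl_cons, ih, pvLen_stepA]

theorem pvRowLen_foldPairs (g : List (List Int)) (P : List (Nat × Nat)) (res : List (List Int)) (i : Nat) :
    ((P.foldl (fun acc p => pvStepA g acc p.1 p.2) res).getD i []).length = ((res.getD i []).length) := by
  induction P generalizing res with
  | nil => rfl
  | cons p P ih => rw [List.foldl_cons, ih, pvRowLen_stepA]

-- A's nested loops = a single fold over the flattened pair list
theorem pvNested_eq_flat (g : List (List Int)) (n : Nat) (init : List (List Int)) :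
    (List.range n).foldl
      (fun res r => (List.range' (r + 1) (n - (r + 1))).foldl (fun res2 c => pvStepA g res2 r c) res)
      init =
    ((List.range n).flatMap (fun r => (List.range' (r + 1) (n - (r + 1))).map (fun c => (r, c)))).foldl
      (fun acc p => pvStepA g acc p.1 p.2) init := by
  rw [List.foldl_flatMap]
  simp [List.foldl_map]

theorem pvMem_pairs (n r c : Nat) :
    (r, c) ∈ (List.range n).flatMap (fun r => (List.range' (r + 1) (n - (r + 1))).map (fun c => (r, c))) ↔
      r < c ∧ c < n := by
  simp only [List.mem_flatMap, List.mem_map, List.mem_range, List.mem_range', Prod.mk.injEq]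
  constructor
  · rintro ⟨a, ha, b, ⟨k, hk, hb⟩, rfl, rfl⟩; omega
  · rintro ⟨hrc, hcn⟩
    exact ⟨r, by omega, c, ⟨c - (r + 1), by omega, by omega⟩, rfl, rfl⟩

theorem pvExistsWrites (g : List (List Int)) (n i j : Nat) :
    (∃ p ∈ (List.range n).flatMap (fun r => (List.range' (r + 1) (n - (r + 1))).map (fun c => (r, c))),
        pvWrites g p.1 p.2 i j) ↔
      (i < n ∧ j < n ∧ i ≠ j ∧ pvG g i j = 0 ∧ pvG g j i ≠ 0) := by
  constructor
  · rintro ⟨⟨r, c⟩, hmem, hw⟩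
    have hrc := (pvMem_pairs n r c).mp hmem
    rcases hw with ⟨ha, hb, rfl, rfl⟩ | ⟨ha, hb, rfl, rfl⟩
    · exact ⟨by omega, by omega, by omega, hb, ha⟩
    · exact ⟨by omega, by omega, by omega, hb, ha⟩
  · rintro ⟨hi, hj, hne, hz, hnz⟩
    rcases Nat.lt_or_ge i j with hlt | hge
    · exact ⟨(i, j), (pvMem_pairs n i j).mpr ⟨hlt, hj⟩, Or.inr ⟨hnz, hz, rfl, rfl⟩⟩
    · exact ⟨(j, i), (pvMem_pairs n j i).mpr ⟨by omega, hi⟩, Or.inl ⟨hnz, hz, rfl, rfl⟩⟩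

-- ===== VERDICT (by name: the statement is the Claim_ definition above) =====
theorem complete_symmetry_diagonal_spec : Claim_equal_complete_symmetry_diagonal := by
  intro grid _ hpre
  unfold Pre_complete_symmetry_diagonal at hpre
  unfold Spec_complete_symmetry_diagonal complete_symmetry_diagonal complete_symmetry_diagonal_alt
  by_cases h0 : grid = [] ∨ grid.headD [] = []
  · rw [if_pos h0, if_pos h0]
  · rw [if_neg h0, if_neg h0]
    simp only [List.map_id']
    set n := min grid.length (grid.headD []).length with hn
    rw [pvNested_eq_flat]
    set P2 := (List.range n).flatMap
      (fun r => (List.range' (r + 1) (n - (r + 1))).map (fun c => (r, c))) with hP2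
    set F := P2.foldl (fun acc p => pvStepA grid acc p.1 p.2) grid with hF
    have hnle : n ≤ grid.length := Nat.min_le_left _ _
    have hP : ∀ p ∈ P2, p.1 < p.2 ∧ p.2 < n := by
      rintro ⟨r, c⟩ hmem
      exact (pvMem_pairs n r c).mp hmem
    have hcell : ∀ i j, pvG F i j =
        if ∃ p ∈ P2, pvWrites grid p.1 p.2 i j then pvG grid j i else pvG grid i j :=
      fun i j => pvG_foldPairs grid n hpre hnle P2 hP grid rfl (fun _ => rfl) i j
    have hlen : F.length = grid.length := pvLen_foldPairs grid P2 grid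
    have hrow : ∀ i, (F.getD i []).length = (grid.getD i []).length :=
      fun i => pvRowLen_foldPairs grid P2 grid i
    apply List.ext_getElem
    · simp [hlen]
    · intro i hi1 hi2
      rw [List.getElem_map, List.getElem_range]
      have hig : i < grid.length := by rwa [hlen] at hi1
      apply List.ext_getElem
      · rw [← List.getD_eq_getElem _ [] hi1, hrow i, List.length_map, List.length_range,
          List.getD_eq_getElem _ [] hig]
      · intro j hj1 hj2
        rw [List.getElem_map, List.getElem_range]
        have hLHS : pvG F i j = (F[i]'hi1)[j]'hj1 := by
          rw [pvG, List.getD_eq_getElem _ [] hi1, List.getD_eq_getElem _ 0 hj1]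
        rw [← hLHS, hcell i j, hP2, if_congr (pvExistsWrites grid n i j) rfl rfl]
        by_cases hij : i < n ∧ j < n
        · rw [if_pos hij]
          by_cases hz : pvG grid i j = 0
          · by_cases hne : i = j
            · subst hne
              rw [if_neg (by tauto), if_neg (by simpa using hz)]
            · by_cases hnz : pvG grid j i = 0
              · rw [if_neg (by tauto), if_neg (by simpa using hz), hz, hnz]
              · rw [if_pos ⟨hij.1, hij.2, hne, hz, hnz⟩, if_neg (by simpa using hz)]
          · rw [if_neg (by tauto), if_pos hz]
        · rw [if_neg (fun h => hij ⟨h.1, h.2.1⟩), if_neg hij]
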